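-- pv_equiv track=rewrite | github.com/irsiksoftware/PublicWebsite | thor_pr_merger_live.py | get_issue_priority
-- ===== SOURCE A (Python) =====
-- def get_issue_priority(labels):
--     """Extract priority from issue labels"""
--     priority_map = {
--         'critical': 1,
--         'urgent': 2,
--         'high': 3,
--         'medium': 4,
--         'low': 5
--     }
--
--     for label in labels:
--         label_name = label.get('name', '').lower()
--         for priority_key, priority_value in priority_map.items():
--             if priority_key in label_name:
--                 return priority_value
--
--     return 6  # No priority label
-- ===== SOURCE B (Python) =====
-- # Position-driven scan: walk the name once, dispatch on each character via a
-- # first-letter table (all five keywords start with distinct letters), check the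
-- # full keyword at that position, and keep the minimum value seen.
-- FIRST_LETTER = {'c': ('critical', 1), 'u': ('urgent', 2), 'h': ('high', 3),
--                 'm': ('medium', 4), 'l': ('low', 5)}
--
-- def get_issue_priority(labels):
--     """Extract priority from issue labels"""
--     for label in labels:
--         name = label.get('name', '').lower()
--         best = 6
--         for i, ch in enumerate(name):
--             entry = FIRST_LETTER.get(ch)
--             if entry is not None and name.startswith(entry[0], i) and entry[1] < best:
--                 best = entry[1]
--         if best < 6:
--             return best
--     return 6
-- ===== Notes on version B (the rewrite author's own statement) =====
-- stated objective: alternative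
-- what changed: A scans the five keywords per label and substring-searches each; B walks the label name once position by position, hash-dispatches on the character's first letter to at most one candidate keyword, verifies it in place, and accumulates the minimum matched value (equal to A's dict-order first match because the table is ordered by ascending value).
import Mathlib
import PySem

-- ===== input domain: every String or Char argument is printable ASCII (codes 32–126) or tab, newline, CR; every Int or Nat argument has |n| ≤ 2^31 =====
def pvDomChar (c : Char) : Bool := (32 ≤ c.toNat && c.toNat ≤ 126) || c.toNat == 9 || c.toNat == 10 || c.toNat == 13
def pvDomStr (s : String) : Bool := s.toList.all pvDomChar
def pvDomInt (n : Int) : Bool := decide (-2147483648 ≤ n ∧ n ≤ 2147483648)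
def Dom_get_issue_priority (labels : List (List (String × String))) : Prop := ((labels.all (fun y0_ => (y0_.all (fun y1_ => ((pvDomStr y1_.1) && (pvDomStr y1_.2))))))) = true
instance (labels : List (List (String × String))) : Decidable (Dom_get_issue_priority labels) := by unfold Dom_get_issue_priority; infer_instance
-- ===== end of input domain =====

-- B replaces A's per-label scan over the keyword table (substring search per keyword) by a single
-- position scan over the name with a first-letter hash dispatch and a running minimum (alternative).

-- ===== PORT A =====
-- A's priority_map literal, in insertion order
def pmA : List (String × Int) :=
  [("critical", 1), ("urgent", 2), ("high", 3), ("medium", 4), ("low", 5)]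

-- A's inner 'for priority_key, priority_value in priority_map.items(): if key in name: return value'
def innerA (name : List Char) : List (String × Int) → Option Int
  | [] => none
  | (k, v) :: rest =>
    if PySem.Chars.isIn k.toList name then some v else innerA name rest

def get_issue_priority : List (List (String × String)) → Int
  | [] => 6
  | label :: rest =>
    let name := PySem.Chars.lower ((PySem.Dict.getD (PySem.Dict.mk label) "name" "").toList)
    match innerA name pmA with
    | some v => v
    | none => get_issue_priority rest

-- ===== PORT B =====
-- B's module-level FIRST_LETTER dict
def firstLetter : PySem.Dict Char (String × Int) :=
  PySem.Dict.mk [('c', ("critical", 1)), ('u', ("urgent", 2)), ('h', ("high", 3)),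
                 ('m', ("medium", 4)), ('l', ("low", 5))]

-- loop body of B's position scan: 'entry = FIRST_LETTER.get(ch); if entry is not None and
-- name.startswith(entry[0], i) and entry[1] < best: best = entry[1]'.
-- name.startswith(k, i) is ported by hand as startswith on name.drop i — exact here, since
-- i is a nonnegative in-range enumerate index.
def stepB (name : List Char) (best : Int) (p : Int × Char) : Int :=
  match PySem.Dict.get? firstLetter p.2 with
  | some entry =>
      if PySem.Chars.startswith (name.drop p.1.toNat) entry.1.toList ∧ entry.2 < best
      then entry.2 else best
  | none => best

def get_issue_priority_alt : List (List (String × String)) → Int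
  | [] => 6
  | label :: rest =>
    let name := PySem.Chars.lower ((PySem.Dict.getD (PySem.Dict.mk label) "name" "").toList)
    let best := (PySem.List.enumerate name).foldl (stepB name) 6
    if best < 6 then best else get_issue_priority_alt rest

-- ===== PRECONDITION & SPEC =====
def Spec_get_issue_priority (labels : List (List (String × String))) (out : Int) : Prop := out = get_issue_priority_alt labels
instance (labels : List (List (String × String))) (out : Int) : Decidable (Spec_get_issue_priority labels out) := by unfold Spec_get_issue_priority; infer_instance

-- ===== CLAIM (what is proved, stated in full; the proofs are below) =====
def Claim_equal_get_issue_priority : Prop := ∀ (labels : List (List (String × String))), Dom_get_issue_priority labels → Spec_get_issue_priority labels (get_issue_priority labels)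

-- ===== LEMMAS AND PROOFS =====

-- the value (if any) that B's loop body would record at position p
def matchOf (name : List Char) (p : Int × Char) : Option Int :=
  match PySem.Dict.get? firstLetter p.2 with
  | some entry =>
      if PySem.Chars.startswith (name.drop p.1.toNat) entry.1.toList then some entry.2 else none
  | none => none

theorem stepB_eq_matchOf (name : List Char) (b : Int) (p : Int × Char) :
    stepB name b p = match matchOf name p with
      | some v => if v < b then v else b
      | none => b := by
  unfold stepB matchOf
  cases PySem.Dict.get? firstLetter p.2 with
  | none => rfl
  | some e => by_cases h : PySem.Chars.startswith (name.drop p.1.toNat) e.1.toList <;> simp [h]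

theorem stepB_le (name : List Char) (b : Int) (p : Int × Char) : stepB name b p ≤ b := by
  rw [stepB_eq_matchOf]
  cases matchOf name p with
  | none => exact le_refl b
  | some v =>
    dsimp only
    split_ifs with h
    · exact le_of_lt h
    · exact le_refl b

theorem stepB_prov (name : List Char) (b : Int) (p : Int × Char) :
    stepB name b p = b ∨ matchOf name p = some (stepB name b p) := by
  rw [stepB_eq_matchOf]
  cases h : matchOf name p with
  | none => exact Or.inl rfl
  | some v =>
    dsimp only
    split_ifs with hv
    · exact Or.inr rfl
    · exact Or.inl rfl

theorem fold_le_init (name : List Char) (l : List (Int × Char)) (b : Int) :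
    l.foldl (stepB name) b ≤ b := by
  induction l generalizing b with
  | nil => exact le_refl b
  | cons p l ih => exact le_trans (ih (stepB name b p)) (stepB_le name b p)

theorem fold_le_match (name : List Char) (l : List (Int × Char)) (b : Int)
    (p : Int × Char) (hp : p ∈ l) (v : Int) (hv : matchOf name p = some v) :
    l.foldl (stepB name) b ≤ v := by
  induction l generalizing b with
  | nil => cases hp
  | cons q l ih =>
    rcases List.mem_cons.mp hp with rfl | hmem
    · refine le_trans (fold_le_init name l _) ?_
      rw [stepB_eq_matchOf, hv]
      dsimp only
      split_ifs with h
      · exact le_refl v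
      · omega
    · exact ih _ hmem

theorem fold_prov (name : List Char) (l : List (Int × Char)) (b : Int) :
    l.foldl (stepB name) b = b ∨ ∃ p ∈ l, matchOf name p = some (l.foldl (stepB name) b) := by
  induction l generalizing b with
  | nil => exact Or.inl rfl
  | cons q l ih =>
    simp only [List.foldl_cons]
    rcases ih (stepB name b q) with h | ⟨p, hp, hm⟩
    · rw [h]
      rcases stepB_prov name b q with h' | h'
      · exact Or.inl h'
      · exact Or.inr ⟨q, List.mem_cons_self, h'⟩
    · exact Or.inr ⟨p, List.mem_cons_of_mem _ hp, hm⟩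

-- keyword k (with first letter c, table value v) occurring in name yields a matching position
theorem exists_match (name : List Char) (k : String) (v : Int) (c : Char) (ks : List Char)
    (hk : k.toList = c :: ks) (hc : PySem.Dict.get? firstLetter c = some (k, v))
    (hin : PySem.Chars.isIn k.toList name = true) :
    ∃ p ∈ PySem.List.enumerate name 0, matchOf name p = some v := by
  obtain ⟨j, hpre⟩ := (PySem.Chars.exists_prefix_drop_iff_isIn k.toList name).mpr hin
  have hne : name.drop j ≠ [] := by
    intro h
    rw [h, hk] at hpre
    exact (List.cons_ne_nil c ks) (List.prefix_nil.mp hpre)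
  have hj : j < name.length := by
    by_contra h
    exact hne (List.drop_eq_nil_of_le (le_of_not_gt h))
  have hhead : name[j] = c := by
    obtain ⟨t, ht⟩ := hpre
    have hd : name.drop j = c :: (ks ++ t) := by rw [← ht, hk]; simp
    have hg : (name.drop j)[0]'(by rw [hd]; simp) = c := by simp [hd]
    simpa [List.getElem_drop] using hg
  refine ⟨((0 : Int) + (j : Int), name[j]), ?_, ?_⟩
  · exact (PySem.List.mem_enumerate_iff name 0 _).mpr ⟨j, hj, rfl⟩
  · unfold matchOf
    rw [hhead, hc]
    have ht : ((0 : Int) + (j : Int)).toNat = j := by omega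
    rw [ht]
    simp [(PySem.Chars.startswith_iff (name.drop j) k.toList).mpr hpre]

-- any recorded value comes from one of the five keywords occurring in name
theorem match_sound (name : List Char) (p : Int × Char) (v : Int)
    (hm : matchOf name p = some v) :
    (v = 1 ∧ PySem.Chars.isIn "critical".toList name = true) ∨
    (v = 2 ∧ PySem.Chars.isIn "urgent".toList name = true) ∨
    (v = 3 ∧ PySem.Chars.isIn "high".toList name = true) ∨
    (v = 4 ∧ PySem.Chars.isIn "medium".toList name = true) ∨
    (v = 5 ∧ PySem.Chars.isIn "low".toList name = true) := by
  unfold matchOf at hm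
  cases hg : PySem.Dict.get? firstLetter p.2 with
  | none => rw [hg] at hm; cases hm
  | some e =>
    rw [hg] at hm
    have hpre : PySem.Chars.startswith (name.drop p.1.toNat) e.1.toList = true ∧ e.2 = v := by
      by_cases h : PySem.Chars.startswith (name.drop p.1.toNat) e.1.toList = true
      · simp [h] at hm; exact ⟨h, hm⟩
      · simp [h] at hm
    have hin : PySem.Chars.isIn e.1.toList name = true :=
      (PySem.Chars.exists_prefix_drop_iff_isIn e.1.toList name).mp
        ⟨p.1.toNat, (PySem.Chars.startswith_iff (name.drop p.1.toNat) e.1.toList).mp hpre.1⟩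
    have he : e = ("critical", 1) ∨ e = ("urgent", 2) ∨ e = ("high", 3) ∨
        e = ("medium", 4) ∨ e = ("low", 5) := by
      unfold firstLetter at hg
      simp [PySem.Dict.get?] at hg
      obtain ⟨a, hg⟩ := hg
      tauto
    rcases he with rfl | rfl | rfl | rfl | rfl <;> simp_all

-- per-label core: B's position-scan minimum equals A's first-match value (6 when no match)
theorem best_eq (name : List Char) :
    (PySem.List.enumerate name).foldl (stepB name) 6 =
      (match innerA name pmA with | some v => v | none => (6 : Int)) := by
  set B := (PySem.List.enumerate name).foldl (stepB name) 6 with hB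
  have hle6 : B ≤ 6 := fold_le_init name _ 6
  have hub : ∀ k v c ks, k.toList = c :: ks → PySem.Dict.get? firstLetter c = some (k, v) →
      PySem.Chars.isIn k.toList name = true → B ≤ v := by
    intro k v c ks hk hc hin
    obtain ⟨p, hp, hm⟩ := exists_match name k v c ks hk hc hin
    exact fold_le_match name _ 6 p hp v hm
  have u1 : PySem.Chars.isIn "critical".toList name = true → B ≤ 1 :=
    hub "critical" 1 'c' "ritical".toList (by decide) (by decide)
  have u2 : PySem.Chars.isIn "urgent".toList name = true → B ≤ 2 :=
    hub "urgent" 2 'u' "rgent".toList (by decide) (by decide)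
  have u3 : PySem.Chars.isIn "high".toList name = true → B ≤ 3 :=
    hub "high" 3 'h' "igh".toList (by decide) (by decide)
  have u4 : PySem.Chars.isIn "medium".toList name = true → B ≤ 4 :=
    hub "medium" 4 'm' "edium".toList (by decide) (by decide)
  have u5 : PySem.Chars.isIn "low".toList name = true → B ≤ 5 :=
    hub "low" 5 'l' "ow".toList (by decide) (by decide)
  have hsound : B = 6 ∨
      (B = 1 ∧ PySem.Chars.isIn "critical".toList name = true) ∨
      (B = 2 ∧ PySem.Chars.isIn "urgent".toList name = true) ∨
      (B = 3 ∧ PySem.Chars.isIn "high".toList name = true) ∨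
      (B = 4 ∧ PySem.Chars.isIn "medium".toList name = true) ∨
      (B = 5 ∧ PySem.Chars.isIn "low".toList name = true) := by
    rcases fold_prov name (PySem.List.enumerate name) 6 with h | ⟨p, _, hm⟩
    · exact Or.inl h
    · exact Or.inr (match_sound name p B hm)
  clear hub hB
  rcases hsound with h6 | ⟨hB, hb⟩ | ⟨hB, hb⟩ | ⟨hB, hb⟩ | ⟨hB, hb⟩ | ⟨hB, hb⟩
  · have n1 : ¬ PySem.Chars.isIn "critical".toList name = true := fun h => by have := u1 h; omega
    have n2 : ¬ PySem.Chars.isIn "urgent".toList name = true := fun h => by have := u2 h; omega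
    have n3 : ¬ PySem.Chars.isIn "high".toList name = true := fun h => by have := u3 h; omega
    have n4 : ¬ PySem.Chars.isIn "medium".toList name = true := fun h => by have := u4 h; omega
    have n5 : ¬ PySem.Chars.isIn "low".toList name = true := fun h => by have := u5 h; omega
    simp only [innerA, pmA]
    rw [if_neg n1, if_neg n2, if_neg n3, if_neg n4, if_neg n5]
    simpa using h6
  · simp only [innerA, pmA]
    rw [if_pos hb]
    simpa using hB
  · have n1 : ¬ PySem.Chars.isIn "critical".toList name = true := fun h => by have := u1 h; omega
    simp only [innerA, pmA]
    rw [if_neg n1, if_pos hb]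
    simpa using hB
  · have n1 : ¬ PySem.Chars.isIn "critical".toList name = true := fun h => by have := u1 h; omega
    have n2 : ¬ PySem.Chars.isIn "urgent".toList name = true := fun h => by have := u2 h; omega
    simp only [innerA, pmA]
    rw [if_neg n1, if_neg n2, if_pos hb]
    simpa using hB
  · have n1 : ¬ PySem.Chars.isIn "critical".toList name = true := fun h => by have := u1 h; omega
    have n2 : ¬ PySem.Chars.isIn "urgent".toList name = true := fun h => by have := u2 h; omega
    have n3 : ¬ PySem.Chars.isIn "high".toList name = true := fun h => by have := u3 h; omega
    simp only [innerA, pmA]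
    rw [if_neg n1, if_neg n2, if_neg n3, if_pos hb]
    simpa using hB
  · have n1 : ¬ PySem.Chars.isIn "critical".toList name = true := fun h => by have := u1 h; omega
    have n2 : ¬ PySem.Chars.isIn "urgent".toList name = true := fun h => by have := u2 h; omega
    have n3 : ¬ PySem.Chars.isIn "high".toList name = true := fun h => by have := u3 h; omega
    have n4 : ¬ PySem.Chars.isIn "medium".toList name = true := fun h => by have := u4 h; omega
    simp only [innerA, pmA]
    rw [if_neg n1, if_neg n2, if_neg n3, if_neg n4, if_pos hb]
    simpa using hB

theorem innerA_bounds (name : List Char) (v : Int) : ∀ l, l.Forall (fun kv => kv.2 < 6) →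
    innerA name l = some v → v < 6
  | [], _, h => by cases h
  | (k, w) :: rest, hf, h => by
    rw [List.forall_cons] at hf
    rw [innerA] at h
    split_ifs at h with hc
    · cases h; exact hf.1
    · exact innerA_bounds name v rest hf.2 h

theorem get_issue_priority_eq (labels : List (List (String × String))) :
    get_issue_priority labels = get_issue_priority_alt labels := by
  induction labels with
  | nil => rfl
  | cons label rest ih =>
    rw [get_issue_priority, get_issue_priority_alt, best_eq, ih]
    cases h : innerA (PySem.Chars.lower ((PySem.Dict.getD (PySem.Dict.mk label) "name" "").toList)) pmA with
    | none => simp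
    | some v =>
      have hv := innerA_bounds _ v pmA (by simp [pmA]) h
      simp [hv]

-- ===== VERDICT (by name: the statement is the Claim_ definition above) =====
theorem get_issue_priority_spec : Claim_equal_get_issue_priority := by
  intro labels _
  exact get_issue_priority_eq labels
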